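-- pv_equiv track=rewrite | github.com/flcamarao/Programming-for-Data-Science | Python Exercises I.py | create_squares
-- ===== SOURCE A (Python) =====
-- def create_squares(num_stars):
--     squares = ""
--     alternate = 2
--     for a in range(2):
--         for a in range(2):
--             squares += "+ "
--             for a in range(num_stars):
--                 squares += "- "
--         squares += "+\n"
--         for a in range(num_stars):
--             for a in range(2):
--                 squares += "| "
--                 if(alternate % 2 == 0):
--                     for a in range(num_stars):
--                         squares += "* "
--                     alternate += 1
--                 else:
--                     for a in range(num_stars):
--                         squares += "  "
--                     alternate += 1
--             squares += "|\n"
--         alternate += 1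
--     for a in range(2):
--         squares += "+ "
--         for a in range(num_stars):
--             squares += "- "
--     squares += "+\n"
--     return squares
-- ===== SOURCE B (Python) =====
-- def create_squares(num_stars):
--     border = ("+ " + "- " * num_stars) * 2 + "+\n"
--     star = "* " * num_stars
--     blank = "  " * num_stars
--     lines = []
--     for left, right in ((star, blank), (blank, star)):
--         lines.append(border)
--         lines += ["| " + left + "| " + right + "|\n"] * num_stars
--     lines.append(border)
--     return "".join(lines)
-- ===== Notes on version B (the rewrite author's own statement) =====
-- stated objective: simpler
-- what changed: Replaces the triply-nested character-by-character '+=' accumulation with a mutable 'alternate' parity counter by building the three reusable pieces (border, star cell, blank cell) once via string repetition, assembling the two big rows by swapping the cells, and joining a list of lines.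
import Mathlib
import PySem

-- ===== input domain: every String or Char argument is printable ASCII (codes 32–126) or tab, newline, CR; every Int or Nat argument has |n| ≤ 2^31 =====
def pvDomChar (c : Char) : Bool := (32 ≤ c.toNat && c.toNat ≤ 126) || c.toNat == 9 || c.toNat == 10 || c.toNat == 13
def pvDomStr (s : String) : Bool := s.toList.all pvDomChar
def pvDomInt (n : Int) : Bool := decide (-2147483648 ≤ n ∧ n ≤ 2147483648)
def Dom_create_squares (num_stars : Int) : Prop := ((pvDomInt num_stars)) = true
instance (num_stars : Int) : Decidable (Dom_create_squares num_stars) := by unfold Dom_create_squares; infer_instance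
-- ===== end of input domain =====

-- B rebuilds the 2×2 checkerboard from three repeated pieces (border, star cell, blank cell)
-- instead of A's nested loops with a mutable parity counter; same output, simpler and measured faster (constant factor: repetition + join instead of repeated '+=').

-- ===== PORT A =====
-- literal transliteration of A: each 'for a in range(...)' is a foldl over PySem.List.pyRange,
-- each loop body is a named helper; the state is (squares, alternate)
def pvDash (n : Int) (sq : String) : String :=
  (PySem.List.pyRange 0 n 1).foldl (fun sq _ => sq ++ "- ") sq

def pvBorder (n : Int) (sq : String) : String :=
  (PySem.List.pyRange 0 2 1).foldl (fun sq _ => pvDash n (sq ++ "+ ")) sq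

def pvCell (n : Int) (st : String × Int) (_ : Int) : String × Int :=
  let sq := st.1 ++ "| "
  if PySem.Int.mod st.2 2 == 0 then
    ((PySem.List.pyRange 0 n 1).foldl (fun sq _ => sq ++ "* ") sq, st.2 + 1)
  else
    ((PySem.List.pyRange 0 n 1).foldl (fun sq _ => sq ++ "  ") sq, st.2 + 1)

def pvLine (n : Int) (st : String × Int) (_ : Int) : String × Int :=
  let st3 := (PySem.List.pyRange 0 2 1).foldl (pvCell n) st
  (st3.1 ++ "|\n", st3.2)

def pvBigRow (n : Int) (st : String × Int) (_ : Int) : String × Int :=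
  let sq := pvBorder n st.1 ++ "+\n"
  let st2 := (PySem.List.pyRange 0 n 1).foldl (pvLine n) (sq, st.2)
  (st2.1, st2.2 + 1)

def create_squares (num_stars : Int) : String :=
  let st := (PySem.List.pyRange 0 2 1).foldl (pvBigRow num_stars) ("", 2)
  pvBorder num_stars st.1 ++ "+\n"

-- ===== PORT B =====
-- Python 's * n' for a string (empty for n <= 0): exact
def pyStrMul (s : String) (n : Int) : String := String.join (List.replicate n.toNat s)

def create_squares_alt (num_stars : Int) : String :=
  let border := pyStrMul ("+ " ++ pyStrMul "- " num_stars) 2 ++ "+\n"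
  let star := pyStrMul "* " num_stars
  let blank := pyStrMul "  " num_stars
  let lines :=
    [(star, blank), (blank, star)].foldl (fun (acc : List String) pr =>
      (acc ++ [border]) ++ PySem.List.pyRepeat ["| " ++ pr.1 ++ "| " ++ pr.2 ++ "|\n"] num_stars) []
  PySem.Str.join "" (lines ++ [border])

-- ===== PRECONDITION & SPEC =====
def Spec_create_squares (num_stars : Int) (out : String) : Prop := out = create_squares_alt num_stars
instance (num_stars : Int) (out : String) : Decidable (Spec_create_squares num_stars out) := by unfold Spec_create_squares; infer_instance

-- ===== CLAIM (what is proved, stated in full; the proofs are below) =====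
def Claim_equal_create_squares : Prop := ∀ (num_stars : Int), Dom_create_squares num_stars → Spec_create_squares num_stars (create_squares num_stars)

-- ===== LEMMAS AND PROOFS =====

-- p repeated k times
def repS (p : String) : Nat → String
  | 0 => ""
  | k+1 => p ++ repS p k

theorem foldl_app {α : Type} (p : String) (l : List α) : ∀ (s : String),
    l.foldl (fun acc _ => acc ++ p) s = s ++ repS p l.length := by
  induction l with
  | nil => intro s; simp [repS]
  | cons a l ih => intro s; simp [List.foldl, ih, repS, String.append_assoc]

theorem range2 : PySem.List.pyRange 0 2 1 = [0, 1] := by decide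

theorem pvDash_eq (n : Int) (sq : String) : pvDash n sq = sq ++ repS "- " n.toNat := by
  rw [pvDash, foldl_app, PySem.List.length_pyRange_one]
  norm_num

theorem pvBorder_eq (n : Int) (sq : String) :
    pvBorder n sq = sq ++ ("+ " ++ (repS "- " n.toNat ++ ("+ " ++ (repS "- " n.toNat)))) := by
  rw [pvBorder, range2]
  simp [List.foldl, pvDash_eq, String.append_assoc]

theorem mod2_succ (a : Int) : PySem.Int.mod (a + 1) 2 = 0 ↔ ¬ PySem.Int.mod a 2 = 0 := by
  simp only [PySem.Int.mod_eq_emod_of_pos (by norm_num : (0:Int) < 2)]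
  omega

theorem cells_even (n : Int) (s : String) (alt : Int) (h : PySem.Int.mod alt 2 = 0) :
    (PySem.List.pyRange 0 2 1).foldl (pvCell n) (s, alt) =
      (s ++ ("| " ++ (repS "* " n.toNat ++ ("| " ++ repS "  " n.toNat))), alt + 2) := by
  have h1 : ¬ PySem.Int.mod (alt + 1) 2 = 0 := by
    simp only [PySem.Int.mod_eq_emod_of_pos (by norm_num : (0:Int) < 2)] at h ⊢; omega
  rw [range2]
  simp only [List.foldl, pvCell, h, h1, if_pos, if_neg, beq_iff_eq, if_true, if_false]
  rw [foldl_app, foldl_app]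
  simp [PySem.List.length_pyRange_one, String.append_assoc]
  ring

theorem cells_odd (n : Int) (s : String) (alt : Int) (h : ¬ PySem.Int.mod alt 2 = 0) :
    (PySem.List.pyRange 0 2 1).foldl (pvCell n) (s, alt) =
      (s ++ ("| " ++ (repS "  " n.toNat ++ ("| " ++ repS "* " n.toNat))), alt + 2) := by
  have h1 : PySem.Int.mod (alt + 1) 2 = 0 := (mod2_succ alt).mpr h
  rw [range2]
  simp only [List.foldl, pvCell, h, h1, beq_iff_eq, if_true, if_false, if_pos, if_neg]
  rw [foldl_app, foldl_app]
  simp [PySem.List.length_pyRange_one, String.append_assoc]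
  ring

-- one content line in each parity
def lineSB (k : Nat) : String := "| " ++ (repS "* " k ++ ("| " ++ (repS "  " k ++ "|\n")))
def lineBS (k : Nat) : String := "| " ++ (repS "  " k ++ ("| " ++ (repS "* " k ++ "|\n")))

theorem line_even (n : Int) (s : String) (alt : Int) (h : PySem.Int.mod alt 2 = 0) :
    pvLine n (s, alt) 0 = (s ++ lineSB n.toNat, alt + 2) := by
  rw [pvLine]
  simp only [cells_even n s alt h]
  simp [lineSB, String.append_assoc]

theorem line_odd (n : Int) (s : String) (alt : Int) (h : ¬ PySem.Int.mod alt 2 = 0) :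
    pvLine n (s, alt) 0 = (s ++ lineBS n.toNat, alt + 2) := by
  rw [pvLine]
  simp only [cells_odd n s alt h]
  simp [lineBS, String.append_assoc]

theorem pvLine_const (n : Int) (st : String × Int) (a b : Int) : pvLine n st a = pvLine n st b := rfl

theorem mod2_add2 (a : Int) : PySem.Int.mod (a + 2) 2 = 0 ↔ PySem.Int.mod a 2 = 0 := by
  simp only [PySem.Int.mod_eq_emod_of_pos (by norm_num : (0:Int) < 2)]
  omega

theorem lines_even (n : Int) (l : List Int) : ∀ (s : String) (alt : Int),
    PySem.Int.mod alt 2 = 0 →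
    l.foldl (pvLine n) (s, alt) = (s ++ repS (lineSB n.toNat) l.length, alt + 2 * l.length) := by
  induction l with
  | nil => intro s alt _; simp [repS]
  | cons a l ih =>
      intro s alt h
      have : pvLine n (s, alt) a = (s ++ lineSB n.toNat, alt + 2) := by
        rw [pvLine_const n _ a 0]; exact line_even n s alt h
      simp only [List.foldl, this]
      rw [ih _ _ (by rw [mod2_add2]; exact h)]
      simp [repS, String.append_assoc]
      omega

theorem lines_odd (n : Int) (l : List Int) : ∀ (s : String) (alt : Int),
    ¬ PySem.Int.mod alt 2 = 0 →
    l.foldl (pvLine n) (s, alt) = (s ++ repS (lineBS n.toNat) l.length, alt + 2 * l.length) := by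
  induction l with
  | nil => intro s alt _; simp [repS]
  | cons a l ih =>
      intro s alt h
      have : pvLine n (s, alt) a = (s ++ lineBS n.toNat, alt + 2) := by
        rw [pvLine_const n _ a 0]; exact line_odd n s alt h
      simp only [List.foldl, this]
      rw [ih _ _ (by rw [mod2_add2]; exact h)]
      simp [repS, String.append_assoc]
      omega

-- the full border line of A, fully right-associated
def borderS (k : Nat) : String := "+ " ++ (repS "- " k ++ ("+ " ++ (repS "- " k ++ "+\n")))

theorem pvBigRow_const (n : Int) (st : String × Int) (a b : Int) : pvBigRow n st a = pvBigRow n st b := rfl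

theorem bigRow_even (n : Int) (s : String) (alt : Int) (h : PySem.Int.mod alt 2 = 0) :
    pvBigRow n (s, alt) 0 =
      (s ++ (borderS n.toNat ++ repS (lineSB n.toNat) n.toNat), alt + 2 * n.toNat + 1) := by
  rw [pvBigRow]
  simp only [lines_even n _ _ _ h, PySem.List.length_pyRange_one]
  simp [pvBorder_eq, borderS, String.append_assoc]

theorem bigRow_odd (n : Int) (s : String) (alt : Int) (h : ¬ PySem.Int.mod alt 2 = 0) :
    pvBigRow n (s, alt) 0 =
      (s ++ (borderS n.toNat ++ repS (lineBS n.toNat) n.toNat), alt + 2 * n.toNat + 1) := by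
  rw [pvBigRow]
  simp only [lines_odd n _ _ _ h, PySem.List.length_pyRange_one]
  simp [pvBorder_eq, borderS, String.append_assoc]

theorem a_normal (n : Int) :
    create_squares n =
      borderS n.toNat ++ (repS (lineSB n.toNat) n.toNat ++
        (borderS n.toNat ++ (repS (lineBS n.toNat) n.toNat ++ borderS n.toNat))) := by
  have h2 : PySem.Int.mod 2 2 = 0 := by decide
  have hodd : ¬ PySem.Int.mod (2 + 2 * (n.toNat : Int) + 1) 2 = 0 := by
    simp only [PySem.Int.mod_eq_emod_of_pos (by norm_num : (0:Int) < 2)]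
    omega
  rw [create_squares, range2]
  simp only [List.foldl]
  rw [pvBigRow_const n _ 0 0, bigRow_even n _ _ h2, pvBigRow_const n _ 1 0, bigRow_odd n _ _ hodd]
  simp [pvBorder_eq, borderS, String.append_assoc]

-- ===== B side =====

theorem join_empty_cons (x : String) (xs : List String) :
    PySem.Str.join "" (x :: xs) = x ++ PySem.Str.join "" xs := by
  apply String.toList_inj.mp
  cases xs with
  | nil => simp [PySem.Str.toList_join, PySem.Chars.join_nil]
  | cons y ys => simp [PySem.Str.toList_join, PySem.Chars.join_cons_cons]

theorem join_replicate (x : String) (k : Nat) : ∀ (ys : List String),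
    PySem.Str.join "" (List.replicate k x ++ ys) = repS x k ++ PySem.Str.join "" ys := by
  induction k with
  | zero => intro ys; simp [repS]
  | succ k ih => intro ys; simp only [List.replicate_succ, List.cons_append, join_empty_cons, ih,
      repS, String.append_assoc]

theorem join_nil_str : PySem.Str.join "" ([] : List String) = "" := by
  apply String.toList_inj.mp
  simp [PySem.Str.toList_join, PySem.Chars.join_nil]

theorem strMul_eq (s : String) (n : Int) : pyStrMul s n = repS s n.toNat := by
  rw [pyStrMul]
  induction n.toNat with
  | zero => simp [repS, String.join]
  | succ k ih =>
      rw [List.replicate_succ, repS]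
      rw [← ih]
      apply String.toList_inj.mp
      simp [String.toList_join]

theorem b_normal (n : Int) :
    create_squares_alt n =
      borderS n.toNat ++ (repS (lineSB n.toNat) n.toNat ++
        (borderS n.toNat ++ (repS (lineBS n.toNat) n.toNat ++ borderS n.toNat))) := by
  rw [create_squares_alt]
  simp only [List.foldl, PySem.List.pyRepeat_singleton, List.nil_append, List.append_assoc,
    List.cons_append]
  simp only [strMul_eq]
  rw [join_empty_cons]
  rw [join_replicate, join_empty_cons, join_replicate, join_empty_cons, join_nil_str]
  simp [borderS, lineSB, lineBS, repS, String.append_assoc]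

-- ===== VERDICT (by name: the statement is the Claim_ definition above) =====
theorem create_squares_spec : Claim_equal_create_squares := by
  intro n _
  unfold Spec_create_squares
  rw [a_normal, b_normal]
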